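-- pv_equiv track=rewrite | github.com/MaxwellClemens/AdventOfCode2017 | 12/day12.py | calculateChangeToVelocities
-- ===== SOURCE A (Python) =====
-- def calculateChangeToVelocities(currentPositions, allPositions, currentIndex):
--     changeToVelocities = [0,0,0]
--     for index, position in enumerate(allPositions):
--         if index == currentIndex:
--             continue
--         for k in range(3):
--             if currentPositions[k] < position[k]:
--                 changeToVelocities[k] += 1
--             if currentPositions[k] > position[k]:
--                 changeToVelocities[k] -= 1
--     return changeToVelocities
-- ===== SOURCE B (Python) =====
-- def _bisect_left(a, x):
--     lo, hi = 0, len(a)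
--     while lo < hi:
--         mid = (lo + hi) // 2
--         if a[mid] < x:
--             lo = mid + 1
--         else:
--             hi = mid
--     return lo
--
--
-- def _bisect_right(a, x):
--     lo, hi = 0, len(a)
--     while lo < hi:
--         mid = (lo + hi) // 2
--         if a[mid] <= x:
--             lo = mid + 1
--         else:
--             hi = mid
--     return lo
--
--
-- def calculateChangeToVelocities(currentPositions, allPositions, currentIndex):
--     others = [p for i, p in enumerate(allPositions) if i != currentIndex]
--     if not others:
--         return [0, 0, 0]
--     result = []
--     for k in range(3):
--         column = sorted(p[k] for p in others)
--         x = currentPositions[k]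
--         lo = _bisect_left(column, x)
--         hi = _bisect_right(column, x)
--         result.append((len(column) - hi) - lo)
--     return result
-- ===== Notes on version B (the rewrite author's own statement) =====
-- stated objective: alternative
-- what changed: B uses a different algorithm: it filters out the skipped entry once, then for each of the three coordinates sorts that column and obtains the less-than and greater-than counts in closed form via two hand-written binary searches (bisect_left/bisect_right), instead of A's element-by-element comparison scan with an accumulator.
import Mathlib
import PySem

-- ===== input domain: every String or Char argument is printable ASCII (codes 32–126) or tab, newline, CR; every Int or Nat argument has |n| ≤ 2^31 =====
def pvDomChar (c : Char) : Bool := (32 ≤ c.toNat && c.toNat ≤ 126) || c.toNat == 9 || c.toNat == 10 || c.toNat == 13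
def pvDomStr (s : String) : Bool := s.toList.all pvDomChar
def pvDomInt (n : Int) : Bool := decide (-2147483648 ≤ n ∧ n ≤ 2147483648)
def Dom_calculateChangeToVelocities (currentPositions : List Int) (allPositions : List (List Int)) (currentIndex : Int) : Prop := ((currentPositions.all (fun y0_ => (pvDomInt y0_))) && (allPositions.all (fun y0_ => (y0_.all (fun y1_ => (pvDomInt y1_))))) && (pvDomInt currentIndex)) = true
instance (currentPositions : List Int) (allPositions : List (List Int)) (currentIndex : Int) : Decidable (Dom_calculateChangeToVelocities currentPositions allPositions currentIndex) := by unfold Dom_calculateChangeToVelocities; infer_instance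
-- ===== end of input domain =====

-- B replaces A's linear comparison scan by a different algorithm: drop the skipped entry, then per
-- coordinate SORT the column and count less/greater via hand-written binary searches (alternative,
-- not faster: O(n log n) vs A's O(n)).

-- ===== PORT A =====
-- the body of A's inner 'for k in range(3)' loop (the two ifs mutating changeToVelocities[k])
def pvInnerA (cur p ch : List Int) (k : Int) : List Int :=
  let ch := if (PySem.List.pyGet? cur k).getD 0 < (PySem.List.pyGet? p k).getD 0
            then ch.set k.toNat ((PySem.List.pyGet? ch k).getD 0 + 1) else ch
  if (PySem.List.pyGet? cur k).getD 0 > (PySem.List.pyGet? p k).getD 0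
            then ch.set k.toNat ((PySem.List.pyGet? ch k).getD 0 - 1) else ch

-- the body of A's outer 'for index, position in enumerate(allPositions)' loop
def pvStepA (currentPositions : List Int) (currentIndex : Int) (ch : List Int) (ip : Int × List Int) : List Int :=
  if ip.1 == currentIndex then ch
  else (PySem.List.pyRange 0 3 1).foldl (pvInnerA currentPositions ip.2) ch

def calculateChangeToVelocities (currentPositions : List Int) (allPositions : List (List Int)) (currentIndex : Int) : List Int :=
  (PySem.List.enumerate allPositions).foldl (pvStepA currentPositions currentIndex) [0, 0, 0]

-- ===== PORT B =====
-- Source B's hand-written _bisect_left: the while loop becomes recursion on (lo, hi); Source B only calls it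
-- with 0 ≤ lo ≤ hi ≤ len a, where the a[mid] access is always in range (so .getD 0 is exact there)
def pvBisectLeft (a : List Int) (x : Int) (lo hi : Nat) : Nat :=
  if lo < hi then
    let mid := (lo + hi) / 2
    if (PySem.List.pyGet? a (mid : Int)).getD 0 < x then pvBisectLeft a x (mid + 1) hi
    else pvBisectLeft a x lo mid
  else lo
termination_by hi - lo
decreasing_by all_goals omega

-- Source B's hand-written _bisect_right (same shape, '<=' comparison)
def pvBisectRight (a : List Int) (x : Int) (lo hi : Nat) : Nat :=
  if lo < hi then
    let mid := (lo + hi) / 2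
    if (PySem.List.pyGet? a (mid : Int)).getD 0 ≤ x then pvBisectRight a x (mid + 1) hi
    else pvBisectRight a x lo mid
  else lo
termination_by hi - lo
decreasing_by all_goals omega

def calculateChangeToVelocities_alt (currentPositions : List Int) (allPositions : List (List Int)) (currentIndex : Int) : List Int :=
  let others := ((PySem.List.enumerate allPositions).filter (fun ip => !(ip.1 == currentIndex))).map (·.2)
  if others.isEmpty then [0, 0, 0]
  else
    (PySem.List.pyRange 0 3 1).map (fun k =>
      let column := PySem.List.sorted (others.map (fun p => (PySem.List.pyGet? p k).getD 0)) (fun v => v) false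
      let x := (PySem.List.pyGet? currentPositions k).getD 0
      let lo := pvBisectLeft column x 0 column.length
      let hi := pvBisectRight column x 0 column.length
      ((column.length : Int) - (hi : Int)) - (lo : Int))

-- ===== PRECONDITION & SPEC =====
-- Pre_: exactly where the Python A returns normally (it raises IndexError when some non-skipped
-- position, or — as soon as any non-skipped position exists — currentPositions, has fewer than 3 entries).
def Pre_calculateChangeToVelocities (currentPositions : List Int) (allPositions : List (List Int)) (currentIndex : Int) : Prop :=
  ∀ ip ∈ PySem.List.enumerate allPositions, ip.1 ≠ currentIndex →
    3 ≤ currentPositions.length ∧ 3 ≤ ip.2.length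
instance (currentPositions : List Int) (allPositions : List (List Int)) (currentIndex : Int) : Decidable (Pre_calculateChangeToVelocities currentPositions allPositions currentIndex) := by unfold Pre_calculateChangeToVelocities; infer_instance

def pvWitness_calculateChangeToVelocities : List Int × List (List Int) × Int := ([0, 1, 2], [[1, 2, 3], [0, 0, 5]], 0)

def Spec_calculateChangeToVelocities (currentPositions : List Int) (allPositions : List (List Int)) (currentIndex : Int) (out : List Int) : Prop := out = calculateChangeToVelocities_alt currentPositions allPositions currentIndex
instance (currentPositions : List Int) (allPositions : List (List Int)) (currentIndex : Int) (out : List Int) : Decidable (Spec_calculateChangeToVelocities currentPositions allPositions currentIndex out) := by unfold Spec_calculateChangeToVelocities; infer_instance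

-- ===== CLAIM (what is proved, stated in full; the proofs are below) =====
def Claim_equal_calculateChangeToVelocities : Prop := ∀ (currentPositions : List Int) (allPositions : List (List Int)) (currentIndex : Int), Dom_calculateChangeToVelocities currentPositions allPositions currentIndex → Pre_calculateChangeToVelocities currentPositions allPositions currentIndex → Spec_calculateChangeToVelocities currentPositions allPositions currentIndex (calculateChangeToVelocities currentPositions allPositions currentIndex)

-- ===== LEMMAS AND PROOFS =====

lemma pyRange03 : PySem.List.pyRange 0 3 1 = [0, 1, 2] := by decide

def pvSgn (u v : Int) : Int := (if u < v then 1 else 0) - (if u > v then 1 else 0)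

-- A's per-coordinate signed step (proof helper used to break A's combined fold apart)
def pvStepB (currentPositions : List Int) (currentIndex k : Int) (d : Int) (ip : Int × List Int) : Int :=
  if ip.1 == currentIndex then d
  else d + pvSgn ((PySem.List.pyGet? currentPositions k).getD 0) ((PySem.List.pyGet? ip.2 k).getD 0)

-- effect of A's inner-loop body at coordinate 0 on a three-element state
lemma inner0 (cur p : List Int) (x y z : Int) :
    pvInnerA cur p [x, y, z] 0
      = [x + pvSgn ((PySem.List.pyGet? cur 0).getD 0) ((PySem.List.pyGet? p 0).getD 0), y, z] := by
  unfold pvInnerA pvSgn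
  simp [PySem.List.pyGet?, PySem.List.pyIdx?]
  split_ifs <;> simp_all <;> omega

-- effect at coordinate 1
lemma inner1 (cur p : List Int) (x y z : Int) :
    pvInnerA cur p [x, y, z] 1
      = [x, y + pvSgn ((PySem.List.pyGet? cur 1).getD 0) ((PySem.List.pyGet? p 1).getD 0), z] := by
  unfold pvInnerA pvSgn
  simp [PySem.List.pyGet?, PySem.List.pyIdx?]
  split_ifs <;> simp_all <;> omega

-- effect at coordinate 2
lemma inner2 (cur p : List Int) (x y z : Int) :
    pvInnerA cur p [x, y, z] 2
      = [x, y, z + pvSgn ((PySem.List.pyGet? cur 2).getD 0) ((PySem.List.pyGet? p 2).getD 0)] := by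
  unfold pvInnerA pvSgn
  simp [PySem.List.pyGet?, PySem.List.pyIdx?]
  split_ifs <;> simp_all <;> omega

-- A's outer-loop body on a three-element state applies the signed step coordinatewise
lemma pvStepA_eq (cur : List Int) (ci a b c : Int) (ip : Int × List Int) :
    pvStepA cur ci [a, b, c] ip =
      [pvStepB cur ci 0 a ip, pvStepB cur ci 1 b ip, pvStepB cur ci 2 c ip] := by
  unfold pvStepA pvStepB
  by_cases h : ip.1 == ci
  · simp [h]
  · simp only [h, Bool.false_eq_true, ↓reduceIte, pyRange03, List.foldl]
    rw [inner0, inner1, inner2]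

-- loop interchange: A's single fold over the pairs equals three per-coordinate folds
lemma fold_interchange (cur : List Int) (ci a b c : Int) (L : List (Int × List Int)) :
    L.foldl (pvStepA cur ci) [a, b, c] =
      [L.foldl (pvStepB cur ci 0) a, L.foldl (pvStepB cur ci 1) b, L.foldl (pvStepB cur ci 2) c] := by
  induction L generalizing a b c with
  | nil => simp
  | cons x L ih =>
    simp only [List.foldl]
    rw [pvStepA_eq, ih]

-- the k-th column of the non-skipped positions
def pvVals (ci k : Int) (L : List (Int × List Int)) : List Int :=
  (L.filter (fun ip => !(ip.1 == ci))).map (fun ip => (PySem.List.pyGet? ip.2 k).getD 0)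

-- the per-coordinate signed fold counts greater-minus-less over the column
lemma foldB_count (cur : List Int) (ci k : Int) (L : List (Int × List Int)) (d : Int) :
    L.foldl (pvStepB cur ci k) d
      = d + ((pvVals ci k L).countP (fun v => decide ((PySem.List.pyGet? cur k).getD 0 < v)) : Int)
          - ((pvVals ci k L).countP (fun v => decide (v < (PySem.List.pyGet? cur k).getD 0)) : Int) := by
  induction L generalizing d with
  | nil => simp [pvVals]
  | cons ip L ih =>
    have hcons : pvVals ci k (ip :: L)
        = if ip.1 == ci then pvVals ci k L
          else (PySem.List.pyGet? ip.2 k).getD 0 :: pvVals ci k L := by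
      by_cases h : ip.1 == ci <;> simp [pvVals, h]
    by_cases h : ip.1 == ci
    · simp only [List.foldl, pvStepB, h, if_true, hcons]
      exact ih d
    · simp only [List.foldl, pvStepB, h, Bool.false_eq_true, ↓reduceIte, hcons,
        List.countP_cons]
      rw [ih]
      unfold pvSgn
      simp only [decide_eq_true_eq, gt_iff_lt]
      split_ifs <;> push_cast <;> omega

-- a prefix/suffix split characterises countP
lemma countP_split (p : Int → Bool) (a : List Int) (r : Nat) (hr : r ≤ a.length)
    (h1 : ∀ j (_ : j < a.length), j < r → p a[j])
    (h2 : ∀ j (_ : j < a.length), r ≤ j → ¬ p a[j] = true) :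
    a.countP p = r := by
  have hsplit : a = a.take r ++ a.drop r := (List.take_append_drop r a).symm
  rw [hsplit, List.countP_append]
  have hlen : (a.take r).length = r := by simp [List.length_take]; omega
  have c1 : (a.take r).countP p = r := by
    rw [List.countP_eq_length.mpr, hlen]
    intro y hy
    obtain ⟨i, hi, rfl⟩ := List.mem_iff_getElem.mp hy
    rw [List.getElem_take]
    exact h1 i (by omega) (by omega)
  have c2 : (a.drop r).countP p = 0 := by
    rw [List.countP_eq_zero]
    intro y hy
    obtain ⟨i, hi, rfl⟩ := List.mem_iff_getElem.mp hy
    rw [List.getElem_drop]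
    have hi' : i < a.length - r := by simpa using hi
    exact h2 (r + i) (by omega) (by omega)
  omega

-- binary-search invariant for Source B's _bisect_left: on a sorted list it returns countP (< x)
lemma pvBL_loop (a : List Int) (x : Int) (hs : a.Pairwise (· ≤ ·)) :
    ∀ n lo hi, hi - lo = n → lo ≤ hi → hi ≤ a.length →
      (∀ j (_ : j < a.length), j < lo → a[j] < x) →
      (∀ j (_ : j < a.length), hi ≤ j → ¬ a[j] < x) →
      pvBisectLeft a x lo hi = a.countP (fun y => decide (y < x)) := by
  have hmono := List.pairwise_iff_getElem.mp hs
  intro n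
  induction n using Nat.strong_induction_on with
  | _ n ih =>
    intro lo hi hn hlh hhl h1 h2
    rw [pvBisectLeft]
    by_cases hlt : lo < hi
    · simp only [hlt, if_true]
      have hmid1 : lo ≤ (lo + hi) / 2 := by omega
      have hmid2 : (lo + hi) / 2 < hi := by omega
      have hmlen : (lo + hi) / 2 < a.length := by omega
      have hget : (PySem.List.pyGet? a (((lo + hi) / 2 : Nat) : Int)).getD 0 = a[(lo + hi) / 2] := by
        rw [PySem.List.pyGet?_natCast, List.getElem?_eq_getElem hmlen, Option.getD_some]
      rw [hget]
      by_cases hc : a[(lo + hi) / 2] < x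
      · simp only [hc, if_true]
        refine ih (hi - ((lo + hi) / 2 + 1)) (by omega) _ _ rfl (by omega) hhl ?_ h2
        intro j hj hjlt
        rcases Nat.lt_or_ge j lo with h | h
        · exact h1 j hj h
        · rcases Nat.eq_or_lt_of_le (by omega : j ≤ (lo + hi) / 2) with rfl | h'
          · exact hc
          · exact lt_of_le_of_lt (hmono j ((lo + hi) / 2) hj hmlen (by omega)) hc
      · simp only [hc, if_false]
        refine ih ((lo + hi) / 2 - lo) (by omega) _ _ rfl (by omega) (by omega) h1 ?_
        intro j hj hjge
        rcases Nat.eq_or_lt_of_le hjge with rfl | h'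
        · exact hc
        · intro hjx
          exact hc (lt_of_le_of_lt (hmono ((lo + hi) / 2) j hmlen hj (by omega)) hjx)
    · simp only [hlt, if_false]
      have : lo = hi := by omega
      subst this
      exact (countP_split _ a lo hhl (fun j hj hjl => by simpa using h1 j hj hjl)
        (fun j hj hjg => by simpa using h2 j hj hjg)).symm

-- the same invariant for _bisect_right: countP (≤ x)
lemma pvBR_loop (a : List Int) (x : Int) (hs : a.Pairwise (· ≤ ·)) :
    ∀ n lo hi, hi - lo = n → lo ≤ hi → hi ≤ a.length →
      (∀ j (_ : j < a.length), j < lo → a[j] ≤ x) →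
      (∀ j (_ : j < a.length), hi ≤ j → ¬ a[j] ≤ x) →
      pvBisectRight a x lo hi = a.countP (fun y => decide (y ≤ x)) := by
  have hmono := List.pairwise_iff_getElem.mp hs
  intro n
  induction n using Nat.strong_induction_on with
  | _ n ih =>
    intro lo hi hn hlh hhl h1 h2
    rw [pvBisectRight]
    by_cases hlt : lo < hi
    · simp only [hlt, if_true]
      have hmid1 : lo ≤ (lo + hi) / 2 := by omega
      have hmid2 : (lo + hi) / 2 < hi := by omega
      have hmlen : (lo + hi) / 2 < a.length := by omega
      have hget : (PySem.List.pyGet? a (((lo + hi) / 2 : Nat) : Int)).getD 0 = a[(lo + hi) / 2] := by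
        rw [PySem.List.pyGet?_natCast, List.getElem?_eq_getElem hmlen, Option.getD_some]
      rw [hget]
      by_cases hc : a[(lo + hi) / 2] ≤ x
      · simp only [hc, if_true]
        refine ih (hi - ((lo + hi) / 2 + 1)) (by omega) _ _ rfl (by omega) hhl ?_ h2
        intro j hj hjlt
        rcases Nat.lt_or_ge j lo with h | h
        · exact h1 j hj h
        · rcases Nat.eq_or_lt_of_le (by omega : j ≤ (lo + hi) / 2) with rfl | h'
          · exact hc
          · exact le_trans (hmono j ((lo + hi) / 2) hj hmlen (by omega)) hc
      · simp only [hc, if_false]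
        refine ih ((lo + hi) / 2 - lo) (by omega) _ _ rfl (by omega) (by omega) h1 ?_
        intro j hj hjge
        rcases Nat.eq_or_lt_of_le hjge with rfl | h'
        · exact hc
        · intro hjx
          exact hc (le_trans (hmono ((lo + hi) / 2) j hmlen hj (by omega)) hjx)
    · simp only [hlt, if_false]
      have : lo = hi := by omega
      subst this
      exact (countP_split _ a lo hhl (fun j hj hjl => by simpa using h1 j hj hjl)
        (fun j hj hjg => by simpa using h2 j hj hjg)).symm

-- the '≤ x' and '> x' counts partition the list
lemma countP_compl (x : Int) (vals : List Int) :
    vals.countP (fun y => decide (y ≤ x)) + vals.countP (fun y => decide (x < y)) = vals.length := by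
  induction vals with
  | nil => simp
  | cons v vs ihv =>
    simp only [List.countP_cons, List.length_cons, decide_eq_true_eq]
    split_ifs <;> omega

-- B's sort-and-bisect entry equals greater-count minus less-count over the raw column
lemma bentry (vals : List Int) (x : Int) :
    (((PySem.List.sorted vals (fun v => v) false).length : Int)
        - (pvBisectRight (PySem.List.sorted vals (fun v => v) false) x 0
            (PySem.List.sorted vals (fun v => v) false).length : Int))
      - (pvBisectLeft (PySem.List.sorted vals (fun v => v) false) x 0
            (PySem.List.sorted vals (fun v => v) false).length : Int)
    = ((vals.countP (fun v => decide (x < v))) : Int) - ((vals.countP (fun v => decide (v < x))) : Int) := by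
  set c := PySem.List.sorted vals (fun v => v) false with hc
  have hs : c.Pairwise (· ≤ ·) := by
    simpa using PySem.List.sorted_pairwise vals (fun v => v)
  have hperm : c.Perm vals := PySem.List.sorted_perm vals (fun v => v) false
  have hbl : pvBisectLeft c x 0 c.length = c.countP (fun y => decide (y < x)) :=
    pvBL_loop c x hs _ 0 c.length rfl (by omega) le_rfl
      (fun j hj h => by omega) (fun j hj h => by omega)
  have hbr : pvBisectRight c x 0 c.length = c.countP (fun y => decide (y ≤ x)) :=
    pvBR_loop c x hs _ 0 c.length rfl (by omega) le_rfl
      (fun j hj h => by omega) (fun j hj h => by omega)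
  have hlt : c.countP (fun y => decide (y < x)) = vals.countP (fun y => decide (y < x)) :=
    hperm.countP_eq _
  have hle : c.countP (fun y => decide (y ≤ x)) = vals.countP (fun y => decide (y ≤ x)) :=
    hperm.countP_eq _
  have hlen : c.length = vals.length := hperm.length_eq
  have hcompl := countP_compl x vals
  rw [hbl, hbr, hlt, hle, hlen]
  omega

-- ===== VERDICT (by name: the statement is the Claim_ definition above) =====
theorem calculateChangeToVelocities_spec : Claim_equal_calculateChangeToVelocities := by
  intro cur all ci _ _
  unfold Spec_calculateChangeToVelocities calculateChangeToVelocities calculateChangeToVelocities_alt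
  rw [fold_interchange]
  set L := PySem.List.enumerate all with hL
  set others := (L.filter (fun ip => !(ip.1 == ci))).map (·.2) with ho
  have hvals : ∀ k : Int, others.map (fun p => (PySem.List.pyGet? p k).getD 0) = pvVals ci k L := by
    intro k; simp [ho, pvVals, List.map_map]
  by_cases he : others.isEmpty
  · simp only [he, if_true]
    have hnil : ∀ k : Int, pvVals ci k L = [] := by
      intro k
      rw [← hvals k]
      simp only [List.isEmpty_iff] at he
      simp [he]
    have hz : ∀ k : Int, L.foldl (pvStepB cur ci k) 0 = 0 := by
      intro k
      rw [foldB_count, hnil k]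
      simp
    rw [hz 0, hz 1, hz 2]
  · simp only [he, pyRange03, List.map]
    rw [foldB_count cur ci 0, foldB_count cur ci 1, foldB_count cur ci 2]
    rw [hvals 0, hvals 1, hvals 2]
    rw [bentry (pvVals ci 0 L), bentry (pvVals ci 1 L), bentry (pvVals ci 2 L)]
    simp
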